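-- pv_equiv track=rewrite | github.com/Doarmfando/encuestas | backend_sistema/app/services/generator_service.py | _es_likert
-- ===== SOURCE A (Python) =====
-- def _es_likert(opciones: list) -> bool:
--     """Detecta si opciones son tipo Likert (frecuencia/acuerdo)."""
--     if len(opciones) < 3:
--         return False
--     opciones_lower = {o.lower().strip() for o in opciones}
--     patrones = [
--         {"nunca", "casi nunca", "a veces", "muchas veces", "siempre"},
--         {"nunca", "raramente", "a veces", "frecuentemente", "siempre"},
--         {"muy en desacuerdo", "en desacuerdo", "neutral", "de acuerdo", "muy de acuerdo"},
--         {"totalmente en desacuerdo", "en desacuerdo", "ni de acuerdo ni en desacuerdo", "de acuerdo", "totalmente de acuerdo"},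
--         {"nada", "poco", "algo", "bastante", "mucho"},
--         {"never", "rarely", "sometimes", "often", "always"},
--     ]
--     for patron in patrones:
--         if len(opciones_lower & patron) >= 3:
--             return True
--     return False
-- ===== SOURCE B (Python) =====
-- # Inverted index precomputed once: phrase -> pattern indices; one counting pass
-- # over the deduplicated normalized options instead of six set intersections.
-- _INDEX = {
--     "nunca": (0, 1),
--     "casi nunca": (0,),
--     "a veces": (0, 1),
--     "muchas veces": (0,),
--     "siempre": (0, 1),
--     "raramente": (1,),
--     "frecuentemente": (1,),
--     "muy en desacuerdo": (2,),
--     "en desacuerdo": (2, 3),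
--     "neutral": (2,),
--     "de acuerdo": (2, 3),
--     "muy de acuerdo": (2,),
--     "totalmente en desacuerdo": (3,),
--     "ni de acuerdo ni en desacuerdo": (3,),
--     "totalmente de acuerdo": (3,),
--     "nada": (4,),
--     "poco": (4,),
--     "algo": (4,),
--     "bastante": (4,),
--     "mucho": (4,),
--     "never": (5,),
--     "rarely": (5,),
--     "sometimes": (5,),
--     "often": (5,),
--     "always": (5,),
-- }
--
--
-- def _es_likert(opciones: list) -> bool:
--     """Detecta si opciones son tipo Likert (frecuencia/acuerdo)."""
--     if len(opciones) < 3: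
--         return False
--     counts = [0] * 6
--     for o in dict.fromkeys(o.lower().strip() for o in opciones):
--         for i in _INDEX.get(o, ()):
--             counts[i] += 1
--     return any(c >= 3 for c in counts)
-- ===== Notes on version B (the rewrite author's own statement) =====
-- stated objective: alternative
-- what changed: Replaced the six per-pattern set intersections by a precomputed inverted index (phrase -> pattern indices) and a single counting pass over the deduplicated normalized options.
import Mathlib
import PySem

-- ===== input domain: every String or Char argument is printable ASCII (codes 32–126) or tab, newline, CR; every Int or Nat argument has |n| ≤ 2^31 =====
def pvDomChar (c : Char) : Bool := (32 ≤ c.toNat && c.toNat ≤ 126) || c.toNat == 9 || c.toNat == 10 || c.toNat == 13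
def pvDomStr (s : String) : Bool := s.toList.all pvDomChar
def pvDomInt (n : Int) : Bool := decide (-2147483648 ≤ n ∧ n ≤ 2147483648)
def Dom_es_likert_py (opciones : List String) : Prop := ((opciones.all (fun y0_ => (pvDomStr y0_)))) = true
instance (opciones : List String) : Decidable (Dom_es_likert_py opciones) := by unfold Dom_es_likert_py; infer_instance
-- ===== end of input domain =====

-- B replaces A's six set intersections by a precomputed inverted index (phrase -> pattern
-- indices) and a single counting pass over the deduplicated normalized options (objective: alternative).
-- ===== PORT A =====
-- A-side helper: the literal list of Likert patterns from A
def patronesA : List (PySem.Set String) :=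
  [ PySem.Set.ofList ["nunca", "casi nunca", "a veces", "muchas veces", "siempre"],
    PySem.Set.ofList ["nunca", "raramente", "a veces", "frecuentemente", "siempre"],
    PySem.Set.ofList ["muy en desacuerdo", "en desacuerdo", "neutral", "de acuerdo", "muy de acuerdo"],
    PySem.Set.ofList ["totalmente en desacuerdo", "en desacuerdo", "ni de acuerdo ni en desacuerdo", "de acuerdo", "totalmente de acuerdo"],
    PySem.Set.ofList ["nada", "poco", "algo", "bastante", "mucho"],
    PySem.Set.ofList ["never", "rarely", "sometimes", "often", "always"] ]

def es_likert_py (opciones : List String) : Bool :=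
  if opciones.length < 3 then false
  else
    let opciones_lower : PySem.Set String :=
      PySem.Set.ofList (opciones.map fun o => PySem.Str.strip (PySem.Str.lower o))
    patronesA.any fun patron =>
      decide (3 ≤ PySem.Set.len (PySem.Set.inter opciones_lower patron))

-- ===== PORT B =====
-- B-side helper: the inverted index _INDEX from Source B
def indexB : PySem.Dict String (List Int) := PySem.Dict.ofList
  [ ("nunca", [0, 1]), ("casi nunca", [0]), ("a veces", [0, 1]), ("muchas veces", [0]), ("siempre", [0, 1]), ("raramente", [1]), ("frecuentemente", [1]), ("muy en desacuerdo", [2]), ("en desacuerdo", [2, 3]), ("neutral", [2]), ("de acuerdo", [2, 3]), ("muy de acuerdo", [2]), ("totalmente en desacuerdo", [3]), ("ni de acuerdo ni en desacuerdo", [3]), ("totalmente de acuerdo", [3]), ("nada", [4]), ("poco", [4]), ("algo", [4]), ("bastante", [4]), ("mucho", [4]), ("never", [5]), ("rarely", [5]), ("sometimes", [5]), ("often", [5]), ("always", [5]) ]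

-- B-side helper: the body of B's outer loop (inner 'for i in _INDEX.get(o, ())' loop)
def bumpCounts (counts : List Int) (o : String) : List Int :=
  (indexB.getD o []).foldl
    (fun counts i => PySem.List.pySetD counts i (PySem.List.pyGetD counts i 0 + 1)) counts

def es_likert_py_alt (opciones : List String) : Bool :=
  if opciones.length < 3 then false
  else
    let counts :=
      (PySem.List.dedup (opciones.map fun o => PySem.Str.strip (PySem.Str.lower o))).foldl
        bumpCounts (List.replicate 6 (0 : Int))
    counts.any fun c => decide (3 ≤ c)

-- ===== PRECONDITION & SPEC =====
def Spec_es_likert_py (opciones : List String) (out : Bool) : Prop := out = es_likert_py_alt opciones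
instance (opciones : List String) (out : Bool) : Decidable (Spec_es_likert_py opciones out) := by unfold Spec_es_likert_py; infer_instance

-- ===== CLAIM (what is proved, stated in full; the proofs are below) =====
def Claim_equal_es_likert_py : Prop := ∀ (opciones : List String), Dom_es_likert_py opciones → Spec_es_likert_py opciones (es_likert_py opciones)

-- ===== LEMMAS AND PROOFS =====
-- 1 if the i-th pattern contains o, else 0
def pmem (i : Nat) (o : String) : Int :=
  if (patronesA[i]!).contains o then 1 else 0

-- number of elements of S lying in the i-th pattern
def cntI (i : Nat) (S : List String) : Int :=
  ((S.countP fun o => (patronesA[i]!).contains o : Nat) : Int)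

-- one step of B's counting pass bumps exactly the patterns containing o
theorem bump_eq (o : String) (a b c d e f : Int) :
    bumpCounts [a, b, c, d, e, f] o =
      [a + pmem 0 o, b + pmem 1 o, c + pmem 2 o, d + pmem 3 o, e + pmem 4 o, f + pmem 5 o] := by
  by_cases h1 : o = "nunca"
  · subst h1
    rw [bumpCounts, show indexB.getD "nunca" [] = [0, 1] from rfl,
        show pmem 0 "nunca" = 1 from rfl,
        show pmem 1 "nunca" = 1 from rfl,
        show pmem 2 "nunca" = 0 from rfl,
        show pmem 3 "nunca" = 0 from rfl,
        show pmem 4 "nunca" = 0 from rfl,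
        show pmem 5 "nunca" = 0 from rfl]
    norm_num [PySem.List.pySetD, PySem.List.pySet?, PySem.List.pyGetD, PySem.List.pyGet?,
      PySem.List.pyIdx?, show Int.toNat 2 = 2 from rfl, show Int.toNat 3 = 3 from rfl,
      show Int.toNat 4 = 4 from rfl, show Int.toNat 5 = 5 from rfl]
  by_cases h2 : o = "casi nunca"
  · subst h2
    rw [bumpCounts, show indexB.getD "casi nunca" [] = [0] from rfl,
        show pmem 0 "casi nunca" = 1 from rfl,
        show pmem 1 "casi nunca" = 0 from rfl,
        show pmem 2 "casi nunca" = 0 from rfl,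
        show pmem 3 "casi nunca" = 0 from rfl,
        show pmem 4 "casi nunca" = 0 from rfl,
        show pmem 5 "casi nunca" = 0 from rfl]
    norm_num [PySem.List.pySetD, PySem.List.pySet?, PySem.List.pyGetD, PySem.List.pyGet?,
      PySem.List.pyIdx?, show Int.toNat 2 = 2 from rfl, show Int.toNat 3 = 3 from rfl,
      show Int.toNat 4 = 4 from rfl, show Int.toNat 5 = 5 from rfl]
  by_cases h3 : o = "a veces"
  · subst h3
    rw [bumpCounts, show indexB.getD "a veces" [] = [0, 1] from rfl,
        show pmem 0 "a veces" = 1 from rfl,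
        show pmem 1 "a veces" = 1 from rfl,
        show pmem 2 "a veces" = 0 from rfl,
        show pmem 3 "a veces" = 0 from rfl,
        show pmem 4 "a veces" = 0 from rfl,
        show pmem 5 "a veces" = 0 from rfl]
    norm_num [PySem.List.pySetD, PySem.List.pySet?, PySem.List.pyGetD, PySem.List.pyGet?,
      PySem.List.pyIdx?, show Int.toNat 2 = 2 from rfl, show Int.toNat 3 = 3 from rfl,
      show Int.toNat 4 = 4 from rfl, show Int.toNat 5 = 5 from rfl]
  by_cases h4 : o = "muchas veces"
  · subst h4
    rw [bumpCounts, show indexB.getD "muchas veces" [] = [0] from rfl,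
        show pmem 0 "muchas veces" = 1 from rfl,
        show pmem 1 "muchas veces" = 0 from rfl,
        show pmem 2 "muchas veces" = 0 from rfl,
        show pmem 3 "muchas veces" = 0 from rfl,
        show pmem 4 "muchas veces" = 0 from rfl,
        show pmem 5 "muchas veces" = 0 from rfl]
    norm_num [PySem.List.pySetD, PySem.List.pySet?, PySem.List.pyGetD, PySem.List.pyGet?,
      PySem.List.pyIdx?, show Int.toNat 2 = 2 from rfl, show Int.toNat 3 = 3 from rfl,
      show Int.toNat 4 = 4 from rfl, show Int.toNat 5 = 5 from rfl]
  by_cases h5 : o = "siempre"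
  · subst h5
    rw [bumpCounts, show indexB.getD "siempre" [] = [0, 1] from rfl,
        show pmem 0 "siempre" = 1 from rfl,
        show pmem 1 "siempre" = 1 from rfl,
        show pmem 2 "siempre" = 0 from rfl,
        show pmem 3 "siempre" = 0 from rfl,
        show pmem 4 "siempre" = 0 from rfl,
        show pmem 5 "siempre" = 0 from rfl]
    norm_num [PySem.List.pySetD, PySem.List.pySet?, PySem.List.pyGetD, PySem.List.pyGet?,
      PySem.List.pyIdx?, show Int.toNat 2 = 2 from rfl, show Int.toNat 3 = 3 from rfl,
      show Int.toNat 4 = 4 from rfl, show Int.toNat 5 = 5 from rfl]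
  by_cases h6 : o = "raramente"
  · subst h6
    rw [bumpCounts, show indexB.getD "raramente" [] = [1] from rfl,
        show pmem 0 "raramente" = 0 from rfl,
        show pmem 1 "raramente" = 1 from rfl,
        show pmem 2 "raramente" = 0 from rfl,
        show pmem 3 "raramente" = 0 from rfl,
        show pmem 4 "raramente" = 0 from rfl,
        show pmem 5 "raramente" = 0 from rfl]
    norm_num [PySem.List.pySetD, PySem.List.pySet?, PySem.List.pyGetD, PySem.List.pyGet?,
      PySem.List.pyIdx?, show Int.toNat 2 = 2 from rfl, show Int.toNat 3 = 3 from rfl,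
      show Int.toNat 4 = 4 from rfl, show Int.toNat 5 = 5 from rfl]
  by_cases h7 : o = "frecuentemente"
  · subst h7
    rw [bumpCounts, show indexB.getD "frecuentemente" [] = [1] from rfl,
        show pmem 0 "frecuentemente" = 0 from rfl,
        show pmem 1 "frecuentemente" = 1 from rfl,
        show pmem 2 "frecuentemente" = 0 from rfl,
        show pmem 3 "frecuentemente" = 0 from rfl,
        show pmem 4 "frecuentemente" = 0 from rfl,
        show pmem 5 "frecuentemente" = 0 from rfl]
    norm_num [PySem.List.pySetD, PySem.List.pySet?, PySem.List.pyGetD, PySem.List.pyGet?,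
      PySem.List.pyIdx?, show Int.toNat 2 = 2 from rfl, show Int.toNat 3 = 3 from rfl,
      show Int.toNat 4 = 4 from rfl, show Int.toNat 5 = 5 from rfl]
  by_cases h8 : o = "muy en desacuerdo"
  · subst h8
    rw [bumpCounts, show indexB.getD "muy en desacuerdo" [] = [2] from rfl,
        show pmem 0 "muy en desacuerdo" = 0 from rfl,
        show pmem 1 "muy en desacuerdo" = 0 from rfl,
        show pmem 2 "muy en desacuerdo" = 1 from rfl,
        show pmem 3 "muy en desacuerdo" = 0 from rfl,
        show pmem 4 "muy en desacuerdo" = 0 from rfl,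
        show pmem 5 "muy en desacuerdo" = 0 from rfl]
    norm_num [PySem.List.pySetD, PySem.List.pySet?, PySem.List.pyGetD, PySem.List.pyGet?,
      PySem.List.pyIdx?, show Int.toNat 2 = 2 from rfl, show Int.toNat 3 = 3 from rfl,
      show Int.toNat 4 = 4 from rfl, show Int.toNat 5 = 5 from rfl]
  by_cases h9 : o = "en desacuerdo"
  · subst h9
    rw [bumpCounts, show indexB.getD "en desacuerdo" [] = [2, 3] from rfl,
        show pmem 0 "en desacuerdo" = 0 from rfl,
        show pmem 1 "en desacuerdo" = 0 from rfl,
        show pmem 2 "en desacuerdo" = 1 from rfl,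
        show pmem 3 "en desacuerdo" = 1 from rfl,
        show pmem 4 "en desacuerdo" = 0 from rfl,
        show pmem 5 "en desacuerdo" = 0 from rfl]
    norm_num [PySem.List.pySetD, PySem.List.pySet?, PySem.List.pyGetD, PySem.List.pyGet?,
      PySem.List.pyIdx?, show Int.toNat 2 = 2 from rfl, show Int.toNat 3 = 3 from rfl,
      show Int.toNat 4 = 4 from rfl, show Int.toNat 5 = 5 from rfl]
  by_cases h10 : o = "neutral"
  · subst h10
    rw [bumpCounts, show indexB.getD "neutral" [] = [2] from rfl,
        show pmem 0 "neutral" = 0 from rfl,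
        show pmem 1 "neutral" = 0 from rfl,
        show pmem 2 "neutral" = 1 from rfl,
        show pmem 3 "neutral" = 0 from rfl,
        show pmem 4 "neutral" = 0 from rfl,
        show pmem 5 "neutral" = 0 from rfl]
    norm_num [PySem.List.pySetD, PySem.List.pySet?, PySem.List.pyGetD, PySem.List.pyGet?,
      PySem.List.pyIdx?, show Int.toNat 2 = 2 from rfl, show Int.toNat 3 = 3 from rfl,
      show Int.toNat 4 = 4 from rfl, show Int.toNat 5 = 5 from rfl]
  by_cases h11 : o = "de acuerdo"
  · subst h11
    rw [bumpCounts, show indexB.getD "de acuerdo" [] = [2, 3] from rfl,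
        show pmem 0 "de acuerdo" = 0 from rfl,
        show pmem 1 "de acuerdo" = 0 from rfl,
        show pmem 2 "de acuerdo" = 1 from rfl,
        show pmem 3 "de acuerdo" = 1 from rfl,
        show pmem 4 "de acuerdo" = 0 from rfl,
        show pmem 5 "de acuerdo" = 0 from rfl]
    norm_num [PySem.List.pySetD, PySem.List.pySet?, PySem.List.pyGetD, PySem.List.pyGet?,
      PySem.List.pyIdx?, show Int.toNat 2 = 2 from rfl, show Int.toNat 3 = 3 from rfl,
      show Int.toNat 4 = 4 from rfl, show Int.toNat 5 = 5 from rfl]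
  by_cases h12 : o = "muy de acuerdo"
  · subst h12
    rw [bumpCounts, show indexB.getD "muy de acuerdo" [] = [2] from rfl,
        show pmem 0 "muy de acuerdo" = 0 from rfl,
        show pmem 1 "muy de acuerdo" = 0 from rfl,
        show pmem 2 "muy de acuerdo" = 1 from rfl,
        show pmem 3 "muy de acuerdo" = 0 from rfl,
        show pmem 4 "muy de acuerdo" = 0 from rfl,
        show pmem 5 "muy de acuerdo" = 0 from rfl]
    norm_num [PySem.List.pySetD, PySem.List.pySet?, PySem.List.pyGetD, PySem.List.pyGet?,
      PySem.List.pyIdx?, show Int.toNat 2 = 2 from rfl, show Int.toNat 3 = 3 from rfl,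
      show Int.toNat 4 = 4 from rfl, show Int.toNat 5 = 5 from rfl]
  by_cases h13 : o = "totalmente en desacuerdo"
  · subst h13
    rw [bumpCounts, show indexB.getD "totalmente en desacuerdo" [] = [3] from rfl,
        show pmem 0 "totalmente en desacuerdo" = 0 from rfl,
        show pmem 1 "totalmente en desacuerdo" = 0 from rfl,
        show pmem 2 "totalmente en desacuerdo" = 0 from rfl,
        show pmem 3 "totalmente en desacuerdo" = 1 from rfl,
        show pmem 4 "totalmente en desacuerdo" = 0 from rfl,
        show pmem 5 "totalmente en desacuerdo" = 0 from rfl]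
    norm_num [PySem.List.pySetD, PySem.List.pySet?, PySem.List.pyGetD, PySem.List.pyGet?,
      PySem.List.pyIdx?, show Int.toNat 2 = 2 from rfl, show Int.toNat 3 = 3 from rfl,
      show Int.toNat 4 = 4 from rfl, show Int.toNat 5 = 5 from rfl]
  by_cases h14 : o = "ni de acuerdo ni en desacuerdo"
  · subst h14
    rw [bumpCounts, show indexB.getD "ni de acuerdo ni en desacuerdo" [] = [3] from rfl,
        show pmem 0 "ni de acuerdo ni en desacuerdo" = 0 from rfl,
        show pmem 1 "ni de acuerdo ni en desacuerdo" = 0 from rfl,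
        show pmem 2 "ni de acuerdo ni en desacuerdo" = 0 from rfl,
        show pmem 3 "ni de acuerdo ni en desacuerdo" = 1 from rfl,
        show pmem 4 "ni de acuerdo ni en desacuerdo" = 0 from rfl,
        show pmem 5 "ni de acuerdo ni en desacuerdo" = 0 from rfl]
    norm_num [PySem.List.pySetD, PySem.List.pySet?, PySem.List.pyGetD, PySem.List.pyGet?,
      PySem.List.pyIdx?, show Int.toNat 2 = 2 from rfl, show Int.toNat 3 = 3 from rfl,
      show Int.toNat 4 = 4 from rfl, show Int.toNat 5 = 5 from rfl]
  by_cases h15 : o = "totalmente de acuerdo"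
  · subst h15
    rw [bumpCounts, show indexB.getD "totalmente de acuerdo" [] = [3] from rfl,
        show pmem 0 "totalmente de acuerdo" = 0 from rfl,
        show pmem 1 "totalmente de acuerdo" = 0 from rfl,
        show pmem 2 "totalmente de acuerdo" = 0 from rfl,
        show pmem 3 "totalmente de acuerdo" = 1 from rfl,
        show pmem 4 "totalmente de acuerdo" = 0 from rfl,
        show pmem 5 "totalmente de acuerdo" = 0 from rfl]
    norm_num [PySem.List.pySetD, PySem.List.pySet?, PySem.List.pyGetD, PySem.List.pyGet?,
      PySem.List.pyIdx?, show Int.toNat 2 = 2 from rfl, show Int.toNat 3 = 3 from rfl,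
      show Int.toNat 4 = 4 from rfl, show Int.toNat 5 = 5 from rfl]
  by_cases h16 : o = "nada"
  · subst h16
    rw [bumpCounts, show indexB.getD "nada" [] = [4] from rfl,
        show pmem 0 "nada" = 0 from rfl,
        show pmem 1 "nada" = 0 from rfl,
        show pmem 2 "nada" = 0 from rfl,
        show pmem 3 "nada" = 0 from rfl,
        show pmem 4 "nada" = 1 from rfl,
        show pmem 5 "nada" = 0 from rfl]
    norm_num [PySem.List.pySetD, PySem.List.pySet?, PySem.List.pyGetD, PySem.List.pyGet?,
      PySem.List.pyIdx?, show Int.toNat 2 = 2 from rfl, show Int.toNat 3 = 3 from rfl,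
      show Int.toNat 4 = 4 from rfl, show Int.toNat 5 = 5 from rfl]
  by_cases h17 : o = "poco"
  · subst h17
    rw [bumpCounts, show indexB.getD "poco" [] = [4] from rfl,
        show pmem 0 "poco" = 0 from rfl,
        show pmem 1 "poco" = 0 from rfl,
        show pmem 2 "poco" = 0 from rfl,
        show pmem 3 "poco" = 0 from rfl,
        show pmem 4 "poco" = 1 from rfl,
        show pmem 5 "poco" = 0 from rfl]
    norm_num [PySem.List.pySetD, PySem.List.pySet?, PySem.List.pyGetD, PySem.List.pyGet?,
      PySem.List.pyIdx?, show Int.toNat 2 = 2 from rfl, show Int.toNat 3 = 3 from rfl,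
      show Int.toNat 4 = 4 from rfl, show Int.toNat 5 = 5 from rfl]
  by_cases h18 : o = "algo"
  · subst h18
    rw [bumpCounts, show indexB.getD "algo" [] = [4] from rfl,
        show pmem 0 "algo" = 0 from rfl,
        show pmem 1 "algo" = 0 from rfl,
        show pmem 2 "algo" = 0 from rfl,
        show pmem 3 "algo" = 0 from rfl,
        show pmem 4 "algo" = 1 from rfl,
        show pmem 5 "algo" = 0 from rfl]
    norm_num [PySem.List.pySetD, PySem.List.pySet?, PySem.List.pyGetD, PySem.List.pyGet?,
      PySem.List.pyIdx?, show Int.toNat 2 = 2 from rfl, show Int.toNat 3 = 3 from rfl,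
      show Int.toNat 4 = 4 from rfl, show Int.toNat 5 = 5 from rfl]
  by_cases h19 : o = "bastante"
  · subst h19
    rw [bumpCounts, show indexB.getD "bastante" [] = [4] from rfl,
        show pmem 0 "bastante" = 0 from rfl,
        show pmem 1 "bastante" = 0 from rfl,
        show pmem 2 "bastante" = 0 from rfl,
        show pmem 3 "bastante" = 0 from rfl,
        show pmem 4 "bastante" = 1 from rfl,
        show pmem 5 "bastante" = 0 from rfl]
    norm_num [PySem.List.pySetD, PySem.List.pySet?, PySem.List.pyGetD, PySem.List.pyGet?,
      PySem.List.pyIdx?, show Int.toNat 2 = 2 from rfl, show Int.toNat 3 = 3 from rfl,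
      show Int.toNat 4 = 4 from rfl, show Int.toNat 5 = 5 from rfl]
  by_cases h20 : o = "mucho"
  · subst h20
    rw [bumpCounts, show indexB.getD "mucho" [] = [4] from rfl,
        show pmem 0 "mucho" = 0 from rfl,
        show pmem 1 "mucho" = 0 from rfl,
        show pmem 2 "mucho" = 0 from rfl,
        show pmem 3 "mucho" = 0 from rfl,
        show pmem 4 "mucho" = 1 from rfl,
        show pmem 5 "mucho" = 0 from rfl]
    norm_num [PySem.List.pySetD, PySem.List.pySet?, PySem.List.pyGetD, PySem.List.pyGet?,
      PySem.List.pyIdx?, show Int.toNat 2 = 2 from rfl, show Int.toNat 3 = 3 from rfl,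
      show Int.toNat 4 = 4 from rfl, show Int.toNat 5 = 5 from rfl]
  by_cases h21 : o = "never"
  · subst h21
    rw [bumpCounts, show indexB.getD "never" [] = [5] from rfl,
        show pmem 0 "never" = 0 from rfl,
        show pmem 1 "never" = 0 from rfl,
        show pmem 2 "never" = 0 from rfl,
        show pmem 3 "never" = 0 from rfl,
        show pmem 4 "never" = 0 from rfl,
        show pmem 5 "never" = 1 from rfl]
    norm_num [PySem.List.pySetD, PySem.List.pySet?, PySem.List.pyGetD, PySem.List.pyGet?,
      PySem.List.pyIdx?, show Int.toNat 2 = 2 from rfl, show Int.toNat 3 = 3 from rfl,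
      show Int.toNat 4 = 4 from rfl, show Int.toNat 5 = 5 from rfl]
  by_cases h22 : o = "rarely"
  · subst h22
    rw [bumpCounts, show indexB.getD "rarely" [] = [5] from rfl,
        show pmem 0 "rarely" = 0 from rfl,
        show pmem 1 "rarely" = 0 from rfl,
        show pmem 2 "rarely" = 0 from rfl,
        show pmem 3 "rarely" = 0 from rfl,
        show pmem 4 "rarely" = 0 from rfl,
        show pmem 5 "rarely" = 1 from rfl]
    norm_num [PySem.List.pySetD, PySem.List.pySet?, PySem.List.pyGetD, PySem.List.pyGet?,
      PySem.List.pyIdx?, show Int.toNat 2 = 2 from rfl, show Int.toNat 3 = 3 from rfl,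
      show Int.toNat 4 = 4 from rfl, show Int.toNat 5 = 5 from rfl]
  by_cases h23 : o = "sometimes"
  · subst h23
    rw [bumpCounts, show indexB.getD "sometimes" [] = [5] from rfl,
        show pmem 0 "sometimes" = 0 from rfl,
        show pmem 1 "sometimes" = 0 from rfl,
        show pmem 2 "sometimes" = 0 from rfl,
        show pmem 3 "sometimes" = 0 from rfl,
        show pmem 4 "sometimes" = 0 from rfl,
        show pmem 5 "sometimes" = 1 from rfl]
    norm_num [PySem.List.pySetD, PySem.List.pySet?, PySem.List.pyGetD, PySem.List.pyGet?,
      PySem.List.pyIdx?, show Int.toNat 2 = 2 from rfl, show Int.toNat 3 = 3 from rfl,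
      show Int.toNat 4 = 4 from rfl, show Int.toNat 5 = 5 from rfl]
  by_cases h24 : o = "often"
  · subst h24
    rw [bumpCounts, show indexB.getD "often" [] = [5] from rfl,
        show pmem 0 "often" = 0 from rfl,
        show pmem 1 "often" = 0 from rfl,
        show pmem 2 "often" = 0 from rfl,
        show pmem 3 "often" = 0 from rfl,
        show pmem 4 "often" = 0 from rfl,
        show pmem 5 "often" = 1 from rfl]
    norm_num [PySem.List.pySetD, PySem.List.pySet?, PySem.List.pyGetD, PySem.List.pyGet?,
      PySem.List.pyIdx?, show Int.toNat 2 = 2 from rfl, show Int.toNat 3 = 3 from rfl,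
      show Int.toNat 4 = 4 from rfl, show Int.toNat 5 = 5 from rfl]
  by_cases h25 : o = "always"
  · subst h25
    rw [bumpCounts, show indexB.getD "always" [] = [5] from rfl,
        show pmem 0 "always" = 0 from rfl,
        show pmem 1 "always" = 0 from rfl,
        show pmem 2 "always" = 0 from rfl,
        show pmem 3 "always" = 0 from rfl,
        show pmem 4 "always" = 0 from rfl,
        show pmem 5 "always" = 1 from rfl]
    norm_num [PySem.List.pySetD, PySem.List.pySet?, PySem.List.pyGetD, PySem.List.pyGet?,
      PySem.List.pyIdx?, show Int.toNat 2 = 2 from rfl, show Int.toNat 3 = 3 from rfl,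
      show Int.toNat 4 = 4 from rfl, show Int.toNat 5 = 5 from rfl]
  have h1' : ("nunca" == o) = false := beq_eq_false_iff_ne.mpr (Ne.symm h1)
  have h2' : ("casi nunca" == o) = false := beq_eq_false_iff_ne.mpr (Ne.symm h2)
  have h3' : ("a veces" == o) = false := beq_eq_false_iff_ne.mpr (Ne.symm h3)
  have h4' : ("muchas veces" == o) = false := beq_eq_false_iff_ne.mpr (Ne.symm h4)
  have h5' : ("siempre" == o) = false := beq_eq_false_iff_ne.mpr (Ne.symm h5)
  have h6' : ("raramente" == o) = false := beq_eq_false_iff_ne.mpr (Ne.symm h6)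
  have h7' : ("frecuentemente" == o) = false := beq_eq_false_iff_ne.mpr (Ne.symm h7)
  have h8' : ("muy en desacuerdo" == o) = false := beq_eq_false_iff_ne.mpr (Ne.symm h8)
  have h9' : ("en desacuerdo" == o) = false := beq_eq_false_iff_ne.mpr (Ne.symm h9)
  have h10' : ("neutral" == o) = false := beq_eq_false_iff_ne.mpr (Ne.symm h10)
  have h11' : ("de acuerdo" == o) = false := beq_eq_false_iff_ne.mpr (Ne.symm h11)
  have h12' : ("muy de acuerdo" == o) = false := beq_eq_false_iff_ne.mpr (Ne.symm h12)
  have h13' : ("totalmente en desacuerdo" == o) = false := beq_eq_false_iff_ne.mpr (Ne.symm h13)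
  have h14' : ("ni de acuerdo ni en desacuerdo" == o) = false := beq_eq_false_iff_ne.mpr (Ne.symm h14)
  have h15' : ("totalmente de acuerdo" == o) = false := beq_eq_false_iff_ne.mpr (Ne.symm h15)
  have h16' : ("nada" == o) = false := beq_eq_false_iff_ne.mpr (Ne.symm h16)
  have h17' : ("poco" == o) = false := beq_eq_false_iff_ne.mpr (Ne.symm h17)
  have h18' : ("algo" == o) = false := beq_eq_false_iff_ne.mpr (Ne.symm h18)
  have h19' : ("bastante" == o) = false := beq_eq_false_iff_ne.mpr (Ne.symm h19)
  have h20' : ("mucho" == o) = false := beq_eq_false_iff_ne.mpr (Ne.symm h20)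
  have h21' : ("never" == o) = false := beq_eq_false_iff_ne.mpr (Ne.symm h21)
  have h22' : ("rarely" == o) = false := beq_eq_false_iff_ne.mpr (Ne.symm h22)
  have h23' : ("sometimes" == o) = false := beq_eq_false_iff_ne.mpr (Ne.symm h23)
  have h24' : ("often" == o) = false := beq_eq_false_iff_ne.mpr (Ne.symm h24)
  have h25' : ("always" == o) = false := beq_eq_false_iff_ne.mpr (Ne.symm h25)
  have hg : indexB.getD o [] = [] := by
    rw [show indexB = (⟨[ ("nunca", [0, 1]), ("casi nunca", [0]), ("a veces", [0, 1]), ("muchas veces", [0]), ("siempre", [0, 1]), ("raramente", [1]), ("frecuentemente", [1]), ("muy en desacuerdo", [2]), ("en desacuerdo", [2, 3]), ("neutral", [2]), ("de acuerdo", [2, 3]), ("muy de acuerdo", [2]), ("totalmente en desacuerdo", [3]), ("ni de acuerdo ni en desacuerdo", [3]), ("totalmente de acuerdo", [3]), ("nada", [4]), ("poco", [4]), ("algo", [4]), ("bastante", [4]), ("mucho", [4]), ("never", [5]), ("rarely", [5]), ("sometimes", [5]), ("often", [5]), ("always", [5]) ]⟩ : PySem.Dict String (List Int)) from rfl]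
    simp [PySem.Dict.getD, PySem.Dict.get?, List.find?, h1', h2', h3', h4', h5', h6', h7', h8', h9', h10', h11', h12', h13', h14', h15', h16', h17', h18', h19', h20', h21', h22', h23', h24', h25']
  have hp : ∀ i, pmem i o = 0 := fun i => by
    rcases Nat.lt_or_ge i 6 with h | h
    · interval_cases i <;>
        simp [pmem, patronesA, PySem.Set.contains, PySem.Set.ofList, PySem.Set.add,
          h1, h2, h3, h4, h5, h6, h7, h8, h9, h10, h11, h12, h13, h14, h15, h16, h17, h18, h19, h20, h21, h22, h23, h24, h25]
    · have hn : patronesA[i]? = none := List.getElem?_eq_none (by simp [patronesA]; omega)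
      simp [pmem, List.getElem!_eq_getElem?_getD, hn, PySem.Set.contains, default]
  rw [bumpCounts, hg]
  simp [List.foldl, hp]

-- B's whole counting pass computes the six per-pattern counts
theorem foldl_bump (l : List String) (a b c d e f : Int) :
    l.foldl bumpCounts [a, b, c, d, e, f] =
      [a + cntI 0 l, b + cntI 1 l, c + cntI 2 l, d + cntI 3 l, e + cntI 4 l, f + cntI 5 l] := by
  induction l generalizing a b c d e f with
  | nil => simp [cntI]
  | cons o l ih =>
    rw [List.foldl_cons, bump_eq, ih]
    simp only [cntI, pmem, List.countP_cons, List.cons.injEq]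
    refine ⟨?_, ?_, ?_, ?_, ?_, ?_, trivial⟩ <;> (split_ifs <;> push_cast <;> omega)

-- A's per-pattern intersection size is the same count
theorem len_inter (S : List String) (i : Nat) :
    PySem.Set.len (PySem.Set.inter S (patronesA[i]!)) = cntI i S := by
  simp [PySem.Set.len, PySem.Set.inter, cntI, List.countP_eq_length_filter, PySem.Set.contains]

-- ===== VERDICT (by name: the statement is the Claim_ definition above) =====
theorem es_likert_py_spec : Claim_equal_es_likert_py := by
  intro opciones _
  unfold Spec_es_likert_py es_likert_py es_likert_py_alt
  by_cases h : opciones.length < 3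
  · simp [h]
  · simp only [if_neg h]
    rw [PySem.List.dedup, show (List.replicate 6 (0 : Int)) = [0, 0, 0, 0, 0, 0] from rfl,
        foldl_bump]
    rw [show patronesA = [patronesA[0]!, patronesA[1]!, patronesA[2]!, patronesA[3]!,
          patronesA[4]!, patronesA[5]!] from rfl]
    simp only [List.any_cons, List.any_nil, Bool.or_false, len_inter, zero_add]
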